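-- pv_equiv track=rewrite | github.com/karishmatank/ls-core | py-110/other_practice/prime_product.py | find_prime_products
-- ===== SOURCE A (Python) =====
-- def get_prime_factors(number):
--     primes = set()
--     factor = 2
--     while number >= factor and number != 1:
--         if number % factor == 0:
--             primes.add(factor)
--             number = number // factor
--         else:
--             factor += 1
--     return primes
--
-- def find_prime_products(numbers):
--     return_list = []
--
--     for num in numbers:
--         primes = get_prime_factors(num)
--         factors = list(primes)
--         if len(primes) == 2 and factors[0] * factors[1] == num:
--             return_list.append(num)
--
--     return return_list
-- ===== SOURCE B (Python) =====
-- def _is_prime(n):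
--     if n < 2:
--         return False
--     d = 2
--     while d * d <= n:
--         if n % d == 0:
--             return False
--         d += 1
--     return True
--
--
-- def find_prime_products(numbers):
--     return_list = []
--     for num in numbers:
--         d = 2
--         while d * d <= num:
--             if num % d == 0:
--                 q = num // d
--                 if q != d and _is_prime(q):
--                     return_list.append(num)
--                 break
--             d += 1
--     return return_list
-- ===== Notes on version B (the rewrite author's own statement) =====
-- stated objective: faster
-- what changed: Instead of fully factoring each number by dividing out every prime factor (trial division up to the number itself for primes), B scans divisors only up to sqrt(num): the first divisor d found is the smallest prime factor, and num is kept iff the cofactor num//d is a prime different from d; numbers with no divisor up to sqrt are primes or <=1 and are skipped.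
import Mathlib
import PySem

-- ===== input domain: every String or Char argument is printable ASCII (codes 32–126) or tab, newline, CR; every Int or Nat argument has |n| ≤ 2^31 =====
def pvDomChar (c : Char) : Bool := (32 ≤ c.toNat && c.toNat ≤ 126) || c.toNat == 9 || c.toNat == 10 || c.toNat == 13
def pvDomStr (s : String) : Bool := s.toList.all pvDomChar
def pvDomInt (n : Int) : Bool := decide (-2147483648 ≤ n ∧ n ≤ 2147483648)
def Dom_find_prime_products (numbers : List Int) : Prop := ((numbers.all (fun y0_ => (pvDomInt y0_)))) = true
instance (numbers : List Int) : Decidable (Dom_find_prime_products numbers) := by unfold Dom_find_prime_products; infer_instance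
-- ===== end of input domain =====

-- B replaces A's full factorisation of each number (trial division that can run up to the
-- number itself) by a divisor scan only up to sqrt(num) plus one primality test of the
-- cofactor; measured faster. A's `factors[0] * factors[1]` reads Python's set in hash
-- order, but length and product are order-independent, so the port through PySem.Set is exact.

-- ===== PORT A =====
-- while-loop of get_prime_factors. `fuel` only makes the recursion structural: the loop
-- runs at most `number` turns (the measure number - factor + 1 drops each turn), and the
-- fuel given below is proved sufficient by the lemmas, so the base case is never reached.
def gpfLoop (fuel : Nat) (number factor : Int) (primes : PySem.Set Int) : PySem.Set Int :=
  match fuel with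
  | 0 => primes
  | fuel + 1 =>
    if factor ≤ number ∧ number ≠ 1 then
      if PySem.Int.mod number factor = 0 then
        gpfLoop fuel (PySem.Int.floordiv number factor) factor (primes.add factor)
      else
        gpfLoop fuel number (factor + 1) primes
    else primes

def get_prime_factors (number : Int) : PySem.Set Int :=
  gpfLoop (number.toNat + 1) number 2 PySem.Set.empty

def find_prime_products (numbers : List Int) : List Int :=
  numbers.foldl
    (fun return_list num =>
      let primes := get_prime_factors num
      let factors : List Int := primes
      if factors.length = 2 ∧
          PySem.List.pyGetD factors 0 0 * PySem.List.pyGetD factors 1 0 = num then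
        return_list ++ [num]
      else return_list)
    []

-- ===== PORT B =====
-- while-loop of _is_prime; `fuel` only makes the recursion structural (d grows, d*d ≤ n
-- bounds the turns by n; the given fuel is proved sufficient, the base is never reached).
def ipLoop (fuel : Nat) (n d : Int) : Bool :=
  match fuel with
  | 0 => true
  | fuel + 1 =>
    if d * d ≤ n then
      if PySem.Int.mod n d = 0 then false else ipLoop fuel n (d + 1)
    else true

def b_is_prime (n : Int) : Bool :=
  if n < 2 then false else ipLoop n.toNat n 2

-- while-loop of B's find_prime_products body: returns whether `num` gets appended.
def bLoop (fuel : Nat) (num d : Int) : Bool :=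
  match fuel with
  | 0 => false
  | fuel + 1 =>
    if d * d ≤ num then
      if PySem.Int.mod num d = 0 then
        let q := PySem.Int.floordiv num d
        decide (q ≠ d) && b_is_prime q
      else bLoop fuel num (d + 1)
    else false

def find_prime_products_alt (numbers : List Int) : List Int :=
  numbers.foldl
    (fun return_list num =>
      if bLoop num.toNat num 2 then return_list ++ [num] else return_list)
    []

-- ===== PRECONDITION & SPEC =====
def Spec_find_prime_products (numbers : List Int) (out : List Int) : Prop := out = find_prime_products_alt numbers
instance (numbers : List Int) (out : List Int) : Decidable (Spec_find_prime_products numbers out) := by unfold Spec_find_prime_products; infer_instance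

-- ===== CLAIM (what is proved, stated in full; the proofs are below) =====
def Claim_equal_find_prime_products : Prop := ∀ (numbers : List Int), Dom_find_prime_products numbers → Spec_find_prime_products numbers (find_prime_products numbers)

-- ===== LEMMAS AND PROOFS =====

-- `n` is a product of two distinct positive primes.
def Semi (n : Int) : Prop := ∃ p q : Int, 2 ≤ p ∧ p < q ∧ Prime p ∧ Prime q ∧ n = p * q

-- the smallest divisor ≥ 2 of n is prime
lemma smallest_divisor_prime (n d : Int) (hd : 2 ≤ d) (hdvd : d ∣ n) (hn : 2 ≤ n)
    (hmin : ∀ k : Int, 2 ≤ k → k < d → ¬ k ∣ n) : Prime d := by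
  rw [Int.prime_iff_natAbs_prime, Nat.prime_def_lt]
  refine ⟨by omega, ?_⟩
  intro m hmlt hmdvd
  by_contra hm1
  have hm0 : m ≠ 0 := by
    rintro rfl
    have := Nat.eq_zero_of_zero_dvd hmdvd
    omega
  have h2m : 2 ≤ m := by omega
  have h1 : (m : Int) ∣ d := by
    have := Int.natCast_dvd_natCast.mpr hmdvd
    rwa [Int.natAbs_of_nonneg (by omega)] at this
  exact hmin m (by exact_mod_cast h2m) (by omega) (h1.trans hdvd)

-- a positive prime dividing a product of two positive primes is one of them
lemma prime_dvd_pq {x p q : Int} (hx2 : 2 ≤ x) (hx : Prime x) (hp2 : 2 ≤ p) (hp : Prime p)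
    (hq2 : 2 ≤ q) (hq : Prime q) (hdvd : x ∣ p * q) : x = p ∨ x = q := by
  rcases hx.dvd_mul.mp hdvd with h | h
  · rcases Int.associated_iff.mp (hx.associated_of_dvd hp h) with h' | h'
    · exact Or.inl h'
    · omega
  · rcases Int.associated_iff.mp (hx.associated_of_dvd hq h) with h' | h'
    · exact Or.inr h'
    · omega

-- sqrt-bounded trial division characterises primality (n ≥ 2)
lemma int_prime_iff_no_small_divisor (n : Int) (hn : 2 ≤ n) :
    Prime n ↔ ∀ k : Int, 2 ≤ k → k * k ≤ n → ¬ k ∣ n := by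
  constructor
  · intro hp k hk2 hkk hkdvd
    obtain ⟨m, hm⟩ := hkdvd
    rcases hp.irreducible.isUnit_or_isUnit hm with hu | hu
    · rcases Int.isUnit_iff.mp hu with h | h <;> omega
    · rcases Int.isUnit_iff.mp hu with h | h
      · subst h; nlinarith
      · subst h; nlinarith
  · intro h
    have hnp : Nat.Prime n.natAbs := by
      by_contra hcomp
      have h2 : n.natAbs.minFac ∣ n.natAbs := Nat.minFac_dvd _
      have h3 : 2 ≤ n.natAbs.minFac := (Nat.minFac_prime (by omega)).two_le
      have h4' := Nat.minFac_sq_le_self (n := n.natAbs) (by omega) hcomp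
      have h4 : n.natAbs.minFac * n.natAbs.minFac ≤ n.natAbs := by
        rwa [pow_two] at h4'
      refine h (n.natAbs.minFac : Int) (by exact_mod_cast h3) ?_ ?_
      · have : ((n.natAbs.minFac * n.natAbs.minFac : Nat) : Int) ≤ (n.natAbs : Int) := by
          exact_mod_cast h4
        push_cast at this
        omega
      · have := Int.natCast_dvd_natCast.mpr h2
        rwa [Int.natAbs_of_nonneg (by omega)] at this
    rwa [Int.prime_iff_natAbs_prime]

-- outside the scan range there is no divisor at all
lemma no_small_div_of_exit (n d : Int) (hd2 : 2 ≤ d) (h : ¬ d * d ≤ n)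
    (hmin : ∀ k : Int, 2 ≤ k → k < d → ¬ k ∣ n) :
    ∀ k : Int, 2 ≤ k → k * k ≤ n → ¬ k ∣ n := by
  intro k hk hkk
  apply hmin k hk
  by_contra hkd
  push_neg at hkd
  have : d * d ≤ k * k := mul_le_mul hkd hkd (by omega) (by omega)
  omega

lemma ipLoop_iff_aux : ∀ (fuel : Nat) (n d : Int), 2 ≤ d → 2 ≤ n → (n - d).toNat < fuel →
    (∀ k : Int, 2 ≤ k → k < d → ¬ k ∣ n) →
    (ipLoop fuel n d = true ↔ ∀ k : Int, 2 ≤ k → k * k ≤ n → ¬ k ∣ n) := by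
  intro fuel
  induction fuel with
  | zero => intro n d _ _ hμ _; exact absurd hμ (Nat.not_lt_zero _)
  | succ fuel ih =>
    intro n d hd hn hμ hmin
    rw [ipLoop]
    by_cases h1 : d * d ≤ n
    · rw [if_pos h1]
      by_cases h2 : PySem.Int.mod n d = 0
      · rw [if_pos h2]
        have hdn : d ∣ n := (PySem.Int.mod_eq_zero_iff_dvd n d).mp h2
        refine iff_of_false (by simp) ?_
        intro hall
        exact hall d hd h1 hdn
      · rw [if_neg h2]
        have hdlt : d < n := by nlinarith
        refine ih n (d + 1) (by omega) hn (by omega) ?_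
        intro k hk hklt hkdvd
        rcases (by omega : k < d ∨ k = d) with h | rfl
        · exact hmin k hk h hkdvd
        · exact h2 ((PySem.Int.mod_eq_zero_iff_dvd n k).mpr hkdvd)
    · rw [if_neg h1]
      exact iff_of_true rfl (no_small_div_of_exit n d hd h1 hmin)

lemma b_is_prime_iff (n : Int) : b_is_prime n = true ↔ 2 ≤ n ∧ Prime n := by
  rw [b_is_prime]
  by_cases h : n < 2
  · rw [if_pos h]
    exact iff_of_false (by simp) (by rintro ⟨h2, _⟩; omega)
  · rw [if_neg h]
    rw [ipLoop_iff_aux n.toNat n 2 (by omega) (by omega) (by omega)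
      (by intro k hk hlt; exact absurd hk (by omega))]
    constructor
    · intro hall
      exact ⟨by omega, (int_prime_iff_no_small_divisor n (by omega)).mpr hall⟩
    · rintro ⟨_, hp⟩
      exact (int_prime_iff_no_small_divisor n (by omega)).mp hp

lemma bLoop_iff_aux : ∀ (fuel : Nat) (num d : Int), 2 ≤ d → 2 ≤ num →
    (num - d).toNat < fuel →
    (∀ k : Int, 2 ≤ k → k < d → ¬ k ∣ num) →
    (bLoop fuel num d = true ↔ Semi num) := by
  intro fuel
  induction fuel with
  | zero => intro num d _ _ hμ _; exact absurd hμ (Nat.not_lt_zero _)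
  | succ fuel ih =>
    intro num d hd hn hμ hmin
    rw [bLoop]
    by_cases h1 : d * d ≤ num
    · rw [if_pos h1]
      by_cases h2 : PySem.Int.mod num d = 0
      · rw [if_pos h2]
        have hfd : d ∣ num := (PySem.Int.mod_eq_zero_iff_dvd num d).mp h2
        obtain ⟨c, hc⟩ := hfd
        have hq : PySem.Int.floordiv num d = c := by
          rw [PySem.Int.floordiv_eq_ediv_of_pos (by omega), hc]
          exact Int.mul_ediv_cancel_left c (by omega)
        have hdp : Prime d := smallest_divisor_prime num d hd ⟨c, hc⟩ hn hmin
        have hc1 : 1 ≤ c := by nlinarith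
        simp only [hq, Bool.and_eq_true, decide_eq_true_eq, b_is_prime_iff]
        constructor
        · rintro ⟨hne, h2c, hcp⟩
          have hcd : c ∣ num := ⟨d, by rw [hc]; ring⟩
          have hdc : d < c := by
            rcases lt_or_ge c d with hlt | hge
            · exact absurd hcd (hmin c h2c hlt)
            · omega
          exact ⟨d, c, hd, hdc, hdp, hcp, hc⟩
        · rintro ⟨p, q', hp2, hpq, hpp, hqp, hnum⟩
          have hpd : p ∣ num := ⟨q', hnum⟩
          have hdlep : d ≤ p := by
            by_contra hlt
            push_neg at hlt
            exact hmin p hp2 hlt hpd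
          have hdeq : d = p ∨ d = q' :=
            prime_dvd_pq hd hdp hp2 hpp (by omega) hqp (hnum ▸ ⟨c, hc⟩)
          have hdp' : d = p := by
            rcases hdeq with h | h
            · exact h
            · omega
          subst hdp'
          have hcq' : c = q' := by
            have hdq : d * c = d * q' := by rw [← hc, hnum]
            exact mul_left_cancel₀ (by omega) hdq
          subst hcq'
          exact ⟨by omega, by omega, hqp⟩
      · rw [if_neg h2]
        have hdlt : d < num := by nlinarith
        refine ih num (d + 1) (by omega) hn (by omega) ?_
        intro k hk hklt hkdvd
        rcases (by omega : k < d ∨ k = d) with h | rfl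
        · exact hmin k hk h hkdvd
        · exact h2 ((PySem.Int.mod_eq_zero_iff_dvd num k).mpr hkdvd)
    · rw [if_neg h1]
      refine iff_of_false (by simp) ?_
      rintro ⟨p, q', hp2, hpq, hpp, hqp, hnum⟩
      have hpd : p ∣ num := ⟨q', hnum⟩
      have hdlep : d ≤ p := by
        by_contra hlt
        push_neg at hlt
        exact hmin p hp2 hlt hpd
      have hh1 : d * d ≤ p * p := mul_le_mul hdlep hdlep (by omega) (by omega)
      have hh2 : p * p < p * q' := by nlinarith
      omega

lemma gpfLoop_mem_aux : ∀ (fuel : Nat) (n f : Int) (primes : PySem.Set Int), 2 ≤ f →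
    (n - f + 1).toNat < fuel → 1 ≤ n →
    (∀ k : Int, 2 ≤ k → k < f → ¬ k ∣ n) → ∀ p : Int,
    (p ∈ gpfLoop fuel n f primes ↔ p ∈ primes ∨ (2 ≤ p ∧ Prime p ∧ p ∣ n)) := by
  intro fuel
  induction fuel with
  | zero => intro n f primes _ hμ _ _ _; exact absurd hμ (Nat.not_lt_zero _)
  | succ fuel ih =>
    intro n f primes hf hμ hn hmin p
    rw [gpfLoop]
    by_cases h1 : f ≤ n ∧ n ≠ 1
    · rw [if_pos h1]
      by_cases h2 : PySem.Int.mod n f = 0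
      · rw [if_pos h2]
        obtain ⟨c, hc⟩ := (PySem.Int.mod_eq_zero_iff_dvd n f).mp h2
        have hq : PySem.Int.floordiv n f = c := by
          rw [PySem.Int.floordiv_eq_ediv_of_pos (by omega), hc]
          exact Int.mul_ediv_cancel_left c (by omega)
        have hc1 : 1 ≤ c := by nlinarith
        have hcn : c < n := by nlinarith
        have hfp : Prime f := smallest_divisor_prime n f hf ⟨c, hc⟩ (by omega) hmin
        rw [hq]
        rw [ih c f (primes.add f) hf (by omega) (by omega)
          (by
            intro k hk hlt hkd
            exact hmin k hk hlt (hkd.trans ⟨f, by rw [hc]; ring⟩)) p]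
        rw [PySem.Set.mem_add]
        constructor
        · rintro ((hp | rfl) | ⟨hp2, hpp, hpd⟩)
          · exact Or.inl hp
          · exact Or.inr ⟨hf, hfp, ⟨c, hc⟩⟩
          · exact Or.inr ⟨hp2, hpp, hpd.trans ⟨f, by rw [hc]; ring⟩⟩
        · rintro (hp | ⟨hp2, hpp, hpd⟩)
          · exact Or.inl (Or.inl hp)
          · by_cases hpf : p = f
            · exact Or.inl (Or.inr hpf)
            · refine Or.inr ⟨hp2, hpp, ?_⟩
              rw [hc] at hpd
              rcases hpp.dvd_mul.mp hpd with h | h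
              · exfalso
                rcases Int.associated_iff.mp (hpp.associated_of_dvd hfp h) with h' | h'
                · exact hpf h'
                · omega
              · exact h
      · rw [if_neg h2]
        refine ih n (f + 1) primes (by omega) (by omega) hn ?_ p
        intro k hk hklt hkdvd
        rcases (by omega : k < f ∨ k = f) with h | rfl
        · exact hmin k hk h hkdvd
        · exact h2 ((PySem.Int.mod_eq_zero_iff_dvd n k).mpr hkdvd)
    · rw [if_neg h1]
      by_cases hone : n = 1
      · subst hone
        constructor
        · exact Or.inl
        · rintro (hp | ⟨hp2, _, hpd⟩)
          · exact hp
          · have := Int.le_of_dvd (by norm_num) hpd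
            omega
      · exact absurd (dvd_refl n) (hmin n (by omega) (by omega))

lemma gpfLoop_nodup_aux : ∀ (fuel : Nat) (n f : Int) (primes : PySem.Set Int),
    primes.Nodup → (gpfLoop fuel n f primes).Nodup := by
  intro fuel
  induction fuel with
  | zero => intro n f primes hnd; exact hnd
  | succ fuel ih =>
    intro n f primes hnd
    rw [gpfLoop]
    by_cases h1 : f ≤ n ∧ n ≠ 1
    · rw [if_pos h1]
      by_cases h2 : PySem.Int.mod n f = 0
      · rw [if_pos h2]
        exact ih _ _ _ (PySem.Set.nodup_add primes f hnd)
      · rw [if_neg h2]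
        exact ih _ _ _ hnd
    · rw [if_neg h1]
      exact hnd

-- a nodup list with exactly the two distinct members p and q
lemma nodup_pair_char {l : List Int} {p q : Int} (hnd : l.Nodup) (hpq : p ≠ q)
    (h : ∀ x, x ∈ l ↔ x = p ∨ x = q) : l = [p, q] ∨ l = [q, p] := by
  match l with
  | [] => exact absurd ((h p).mpr (Or.inl rfl)) (List.not_mem_nil)
  | [a] =>
    have hp := (h p).mpr (Or.inl rfl)
    have hq := (h q).mpr (Or.inr rfl)
    simp only [List.mem_singleton] at hp hq
    omega
  | a :: b :: t =>
    have ha := (h a).mp (by simp)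
    have hb := (h b).mp (by simp)
    simp only [List.nodup_cons, List.mem_cons] at hnd
    have hab : a ≠ b := by tauto
    have ht : t = [] := by
      cases t with
      | nil => rfl
      | cons c t' =>
        exfalso
        have hc := (h c).mp (by simp)
        have hac : a ≠ c := by
          have := hnd.1
          simp at this
          tauto
        have hbc : b ≠ c := by
          have := hnd.2.1
          simp at this
          tauto
        rcases ha with h1 | h1 <;> rcases hb with h2 | h2 <;> rcases hc with h3 | h3 <;> omega
    subst ht
    rcases ha with rfl | rfl
    · rcases hb with h2 | rfl
      · exact absurd h2.symm hab
      · exact Or.inl rfl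
    · rcases hb with rfl | h2
      · exact Or.inr rfl
      · exact absurd h2.symm hab

-- A's per-element test is equivalent to Semi (num ≥ 2)
lemma predA_iff (num : Int) (hn : 2 ≤ num) :
    ((get_prime_factors num).length = 2 ∧
      PySem.List.pyGetD (get_prime_factors num) 0 0 *
        PySem.List.pyGetD (get_prime_factors num) 1 0 = num) ↔ Semi num := by
  have hmem : ∀ p : Int, p ∈ get_prime_factors num ↔ (2 ≤ p ∧ Prime p ∧ p ∣ num) := by
    intro p
    have := gpfLoop_mem_aux (num.toNat + 1) num 2 PySem.Set.empty (by omega) (by omega)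
      (by omega) (by intro k hk hlt; exact absurd hk (by omega)) p
    simpa [get_prime_factors, PySem.Set.empty] using this
  have hnd : (get_prime_factors num).Nodup :=
    gpfLoop_nodup_aux (num.toNat + 1) num 2 PySem.Set.empty (by simp [PySem.Set.empty])
  constructor
  · rintro ⟨hlen, hprod⟩
    obtain ⟨a, b, hl⟩ := List.length_eq_two.mp hlen
    rw [hl] at hprod hnd
    have ha := (hmem a).mp (by rw [hl]; simp)
    have hb := (hmem b).mp (by rw [hl]; simp)
    have hab : a ≠ b := by
      simp only [List.nodup_cons, List.mem_singleton] at hnd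
      tauto
    have hprod' : a * b = num := by
      simpa [pysem] using hprod
    rcases lt_trichotomy a b with h | h | h
    · exact ⟨a, b, ha.1, h, ha.2.1, hb.2.1, hprod'.symm⟩
    · exact absurd h hab
    · exact ⟨b, a, hb.1, h, hb.2.1, ha.2.1, by rw [← hprod']; ring⟩
  · rintro ⟨p, q, hp2, hpq, hpp, hqp, rfl⟩
    have hchar : ∀ x : Int, x ∈ get_prime_factors (p * q) ↔ x = p ∨ x = q := by
      intro x
      rw [hmem x]
      constructor
      · rintro ⟨hx2, hxp, hxd⟩
        exact prime_dvd_pq hx2 hxp hp2 hpp (by omega) hqp hxd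
      · rintro (rfl | rfl)
        · exact ⟨hp2, hpp, Dvd.intro q rfl⟩
        · exact ⟨by omega, hqp, Dvd.intro_left p rfl⟩
    rcases nodup_pair_char hnd (by omega) hchar with hl | hl <;> rw [hl] <;>
      refine ⟨rfl, ?_⟩ <;> simp [pysem] <;> ring

-- A's test agrees with B's loop on every input
lemma cond_iff (x : Int) :
    ((get_prime_factors x).length = 2 ∧
      PySem.List.pyGetD (get_prime_factors x) 0 0 *
        PySem.List.pyGetD (get_prime_factors x) 1 0 = x) ↔ bLoop x.toNat x 2 = true := by
  by_cases hx : 2 ≤ x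
  · rw [predA_iff x hx]
    exact (bLoop_iff_aux x.toNat x 2 (by omega) hx (by omega)
      (by intro k hk hlt; exact absurd hk (by omega))).symm
  · have hA : get_prime_factors x = [] := by
      rw [get_prime_factors, gpfLoop, if_neg (by omega)]
      rfl
    have hB : bLoop x.toNat x 2 = false := by
      cases hxt : x.toNat with
      | zero => rw [bLoop]
      | succ k =>
        rw [bLoop, if_neg (by omega)]
    rw [hA, hB]
    simp

lemma step_eq (acc : List Int) (x : Int) :
    (let primes := get_prime_factors x
     let factors : List Int := primes
     if factors.length = 2 ∧
         PySem.List.pyGetD factors 0 0 * PySem.List.pyGetD factors 1 0 = x then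
       acc ++ [x]
     else acc)
    = (if bLoop x.toNat x 2 then acc ++ [x] else acc) := by
  show (if (get_prime_factors x).length = 2 ∧
      PySem.List.pyGetD (get_prime_factors x) 0 0 *
        PySem.List.pyGetD (get_prime_factors x) 1 0 = x then acc ++ [x] else acc) = _
  by_cases h : (get_prime_factors x).length = 2 ∧
      PySem.List.pyGetD (get_prime_factors x) 0 0 *
        PySem.List.pyGetD (get_prime_factors x) 1 0 = x
  · rw [if_pos h, if_pos ((cond_iff x).mp h)]
  · rw [if_neg h, if_neg (fun hb => h ((cond_iff x).mpr hb))]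

lemma fold_eq : ∀ (l acc : List Int),
    l.foldl
      (fun return_list num =>
        let primes := get_prime_factors num
        let factors : List Int := primes
        if factors.length = 2 ∧
            PySem.List.pyGetD factors 0 0 * PySem.List.pyGetD factors 1 0 = num then
          return_list ++ [num]
        else return_list) acc
    = l.foldl
      (fun return_list num =>
        if bLoop num.toNat num 2 then return_list ++ [num] else return_list) acc := by
  intro l
  induction l with
  | nil => intro acc; rfl
  | cons x xs ih =>
    intro acc
    simp only [List.foldl_cons]
    rw [step_eq acc x]
    exact ih _

-- ===== VERDICT (by name: the statement is the Claim_ definition above) =====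
theorem find_prime_products_spec : Claim_equal_find_prime_products := by
  intro numbers _
  show find_prime_products numbers = find_prime_products_alt numbers
  unfold find_prime_products find_prime_products_alt
  exact fold_eq numbers []
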